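-- pv_equiv track=rewrite | github.com/vascofg/adventofcode2019 | day4/solve.py | onlyDoubleDigits
-- ===== SOURCE A (Python) =====
-- def onlyDoubleDigits(digits):
--     current = None
--     count = i = 0
--     while i in range(len(digits)):
--         digit = digits[i]
--         nextDigit = digits[i+1] if i<len(digits)-1 else None
--         if(digit == current):
--             count = count + 1
--         else:
--             current = digit
--             count = 1
--         if(count == 2 and nextDigit != digit):
--             return True
--
--         i = i+1
--     return False
-- ===== SOURCE B (Python) =====
-- def onlyDoubleDigits(digits):
--     i, n = 0, len(digits)
--     while i < n:
--         j = i
--         while j < n and digits[j] == digits[i]: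
--             j += 1
--         if j - i == 2:
--             return True
--         i = j
--     return False
-- ===== Notes on version B (the rewrite author's own statement) =====
-- stated objective: alternative
-- what changed: Replaces A's stateful element-by-element scan (current value, running count, one-step lookahead, early return when count hits 2) by a two-pointer scan that jumps from each run start to its run end and tests whether the run length is exactly 2.
import Mathlib
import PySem

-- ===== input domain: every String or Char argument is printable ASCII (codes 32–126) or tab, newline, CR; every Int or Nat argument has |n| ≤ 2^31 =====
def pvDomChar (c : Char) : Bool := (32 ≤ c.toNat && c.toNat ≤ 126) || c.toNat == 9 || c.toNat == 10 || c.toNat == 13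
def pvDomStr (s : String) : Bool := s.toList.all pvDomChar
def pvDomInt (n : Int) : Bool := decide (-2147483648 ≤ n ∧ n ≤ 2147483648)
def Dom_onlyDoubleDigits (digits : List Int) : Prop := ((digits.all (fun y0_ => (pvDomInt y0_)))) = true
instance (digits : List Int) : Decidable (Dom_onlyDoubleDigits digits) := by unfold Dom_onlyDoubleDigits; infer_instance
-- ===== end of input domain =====

-- B replaces A's stateful current/count scan with one-step lookahead by a two-pointer
-- run-boundary scan that jumps over each maximal run and tests its length (objective: alternative).

-- ===== PORT A =====
-- Python A's while-loop over index i with state (current, count) and one-step lookahead.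
-- `while i in range(len(digits))` is 0 ≤ i < len; `i < len(digits)-1` is i+1 < len here.
def pvLoopA (digits : List Int) (current : Option Int) (count : Int) (i : Nat) : Bool :=
  if h : i < digits.length then
    let digit := digits[i]
    let nextDigit : Option Int := if h2 : i + 1 < digits.length then some digits[i+1] else none
    let current' : Option Int := if some digit = current then current else some digit
    let count' : Int := if some digit = current then count + 1 else 1
    if count' = 2 ∧ nextDigit ≠ some digit then true
    else pvLoopA digits current' count' (i+1)
  else false
termination_by digits.length - i
decreasing_by omega

def onlyDoubleDigits (digits : List Int) : Bool := pvLoopA digits none 0 0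

-- ===== PORT B =====
-- inner while of Source B: advance j while j < n and digits[j] == digits[i]
def pvRunTo (digits : List Int) (i j : Nat) : Nat :=
  if h : j < digits.length then
    if digits[j] = digits[i]! then pvRunTo digits i (j+1) else j
  else j
termination_by digits.length - j

-- termination facts for the outer loop (cited by `decreasing_by` of pvOuter)
lemma le_pvRunTo (digits : List Int) (i : Nat) :
    ∀ n j, digits.length - j ≤ n → j ≤ pvRunTo digits i j := by
  intro n
  induction n with
  | zero =>
    intro j hj
    have hnot : ¬ j < digits.length := by omega
    unfold pvRunTo
    rw [dif_neg hnot]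
  | succ n ih =>
    intro j hj
    unfold pvRunTo
    split
    · split
      · exact le_trans (Nat.le_succ j) (ih (j+1) (by omega))
      · exact le_refl j
    · exact le_refl j

lemma pvRunTo_gt (digits : List Int) (i : Nat) (h : i < digits.length) :
    i < pvRunTo digits i i := by
  have hi : digits[i]! = digits[i] := getElem!_pos digits i h
  unfold pvRunTo
  rw [dif_pos h, hi, if_pos rfl]
  exact lt_of_lt_of_le (Nat.lt_succ_self i) (le_pvRunTo digits i (digits.length - (i+1)) (i+1) le_rfl)

-- outer while of Source B: jump from run start i to run end j, test run length j - i
def pvOuter (digits : List Int) (i : Nat) : Bool :=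
  if h : i < digits.length then
    let j := pvRunTo digits i i
    if j - i = 2 then true else pvOuter digits j
  else false
termination_by digits.length - i
decreasing_by
  have := pvRunTo_gt digits i h
  omega

def onlyDoubleDigits_alt (digits : List Int) : Bool := pvOuter digits 0

-- ===== PRECONDITION & SPEC =====
def Spec_onlyDoubleDigits (digits : List Int) (out : Bool) : Prop := out = onlyDoubleDigits_alt digits
instance (digits : List Int) (out : Bool) : Decidable (Spec_onlyDoubleDigits digits out) := by unfold Spec_onlyDoubleDigits; infer_instance

-- ===== CLAIM (what is proved, stated in full; the proofs are below) =====
def Claim_equal_onlyDoubleDigits : Prop := ∀ (digits : List Int), Dom_onlyDoubleDigits digits → Spec_onlyDoubleDigits digits (onlyDoubleDigits digits)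

-- ===== LEMMAS AND PROOFS =====

-- common reference form: scan maximal runs via takeWhile/dropWhile, test length = 2
def pvGrp : List Int → Bool
  | [] => false
  | x :: xs =>
    if 1 + (xs.takeWhile (· == x)).length = 2 then true
    else pvGrp (xs.dropWhile (· == x))
termination_by l => l.length
decreasing_by
  have := List.length_dropWhile_le (· == x) xs
  simp only [List.length_cons]
  omega

-- list-consuming form of A's loop
def pvLoopL : List Int → Option Int → Int → Bool
  | [], _, _ => false
  | d :: rest, current, count =>
    let nextDigit : Option Int := rest.head?
    let current' : Option Int := if some d = current then current else some d
    let count' : Int := if some d = current then count + 1 else 1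
    if count' = 2 ∧ nextDigit ≠ some d then true else pvLoopL rest current' count'

lemma bridgeA (digits : List Int) :
    ∀ n i current count, digits.length - i ≤ n →
      pvLoopA digits current count i = pvLoopL (digits.drop i) current count := by
  intro n
  induction n with
  | zero =>
    intro i current count hi
    have hnot : ¬ i < digits.length := by omega
    unfold pvLoopA
    rw [dif_neg hnot, List.drop_eq_nil_of_le (by omega)]
    rfl
  | succ n ih =>
    intro i current count hi
    by_cases h : i < digits.length
    · have hd : digits.drop i = digits[i] :: digits.drop (i+1) :=
        List.drop_eq_getElem_cons h
      have hh : (digits.drop (i+1)).head? =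
          (if h2 : i + 1 < digits.length then some digits[i+1] else none) := by
        rw [List.head?_drop]
        split
        · exact List.getElem?_eq_getElem _
        · exact List.getElem?_eq_none (by omega)
      unfold pvLoopA
      rw [dif_pos h, hd]
      unfold pvLoopL
      simp only [← hh]
      split <;> split
      · rfl
      · exact ih (i+1) _ _ (by omega)
      · rfl
      · exact ih (i+1) _ _ (by omega)
    · have : digits.drop i = [] := List.drop_eq_nil_of_le (by omega)
      unfold pvLoopA
      rw [dif_neg h, this]
      rfl

-- joint run-invariant for A's loop: mid-run with count ≥ 2 (the run can no longer count as a
-- double), and just after the first element of a run (count = 1)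
lemma loopL_run (N : Nat) :
    ∀ (xs : List Int), xs.length ≤ N →
      (∀ (x k : Int), 2 ≤ k → pvLoopL xs (some x) k = pvGrp (xs.dropWhile (· == x))) ∧
      (∀ (x : Int), pvLoopL xs (some x) 1 =
        if 1 + (xs.takeWhile (· == x)).length = 2 then true
        else pvGrp (xs.dropWhile (· == x))) := by
  induction N with
  | zero =>
    intro xs hxs
    have : xs = [] := List.eq_nil_of_length_eq_zero (by omega)
    subst this
    constructor
    · intro x k hk; simp [pvLoopL, pvGrp]
    · intro x; simp [pvLoopL, pvGrp]
  | succ N ih =>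
    intro xs hxs
    match xs with
    | [] =>
      constructor
      · intro x k hk; simp [pvLoopL, pvGrp]
      · intro x; simp [pvLoopL, pvGrp]
    | y :: ys =>
      have hlen : ys.length ≤ N := by simpa using Nat.lt_succ_iff.mp (by simpa using hxs)
      constructor
      · intro x k hk
        by_cases hyx : y = x
        · subst hyx
          have : pvLoopL (y :: ys) (some y) k = pvLoopL ys (some y) (k+1) := by
            simp [pvLoopL]
            omega
          rw [this, (ih ys hlen).1 y (k+1) (by omega)]
          simp [List.dropWhile_cons]
        · have : pvLoopL (y :: ys) (some x) k = pvLoopL ys (some y) 1 := by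
            simp [pvLoopL, hyx]
          rw [this, (ih ys hlen).2 y]
          have hbeq : (y == x) = false := by simp [hyx]
          simp [List.dropWhile_cons, hbeq, pvGrp]
      · intro x
        by_cases hyx : y = x
        · subst hyx
          by_cases hh : ys.head? = some y
          · -- run continues: count becomes 2 but the next element is still y
            have h1 : pvLoopL (y :: ys) (some y) 1 = pvLoopL ys (some y) 2 := by
              simp [pvLoopL, hh]
            have ht1 : 1 ≤ (ys.takeWhile (· == y)).length := by
              cases ys with
              | nil => simp at hh
              | cons z zs =>
                have hz : z = y := by simpa using hh
                simp [List.takeWhile_cons, hz]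
            rw [h1, (ih ys hlen).1 y 2 le_rfl]
            rw [List.takeWhile_cons]
            simp only [beq_self_eq_true, if_true]
            rw [if_neg (by simp; omega)]
            simp [List.dropWhile_cons]
          · -- run ends here with total length exactly 2: A returns True
            have h1 : pvLoopL (y :: ys) (some y) 1 = true := by
              simp [pvLoopL]
              exact Or.inl hh
            have ht : ys.takeWhile (· == y) = [] := by
              cases ys with
              | nil => rfl
              | cons z zs =>
                have hz : ¬ z = y := fun h => hh (by simp [h])
                simp [List.takeWhile_cons, hz]
            rw [h1, List.takeWhile_cons]
            simp [ht]
        · have : pvLoopL (y :: ys) (some x) 1 = pvLoopL ys (some y) 1 := by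
            simp [pvLoopL, hyx]
          rw [this, (ih ys hlen).2 y]
          have hbeq : (y == x) = false := by simp [hyx]
          simp [List.takeWhile_cons, List.dropWhile_cons, hbeq, pvGrp]

lemma A_eq_grp (digits : List Int) : onlyDoubleDigits digits = pvGrp digits := by
  unfold onlyDoubleDigits
  rw [bridgeA digits digits.length 0 none 0 (by omega), List.drop_zero]
  cases digits with
  | nil => simp [pvLoopL, pvGrp]
  | cons x xs =>
    have : pvLoopL (x :: xs) none 0 = pvLoopL xs (some x) 1 := by
      simp [pvLoopL]
    rw [this, (loopL_run xs.length xs le_rfl).2 x]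
    simp [pvGrp]

-- B side: characterise pvRunTo, then pvOuter, by the same takeWhile/dropWhile runs
lemma dropWhile_eq_drop {α : Type} (p : α → Bool) (l : List α) :
    l.dropWhile p = l.drop (l.takeWhile p).length := by
  induction l with
  | nil => rfl
  | cons a l ih =>
    by_cases h : p a
    · simp [List.dropWhile_cons, List.takeWhile_cons, h, ih]
    · simp [List.dropWhile_cons, List.takeWhile_cons, h]

lemma runTo_spec (digits : List Int) (i : Nat) (hi : i < digits.length) :
    ∀ n j, digits.length - j ≤ n →
      pvRunTo digits i j = j + ((digits.drop j).takeWhile (· == digits[i])).length := by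
  have hbang : digits[i]! = digits[i] := getElem!_pos digits i hi
  intro n
  induction n with
  | zero =>
    intro j hj
    have hnot : ¬ j < digits.length := by omega
    unfold pvRunTo
    rw [dif_neg hnot, List.drop_eq_nil_of_le (by omega)]
    rfl
  | succ n ih =>
    intro j hj
    by_cases h : j < digits.length
    · have hd : digits.drop j = digits[j] :: digits.drop (j+1) :=
        List.drop_eq_getElem_cons h
      unfold pvRunTo
      rw [dif_pos h, hbang, hd]
      by_cases heq : digits[j] = digits[i]
      · rw [if_pos heq, ih (j+1) (by omega)]
        simp [List.takeWhile_cons, heq]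
        omega
      · rw [if_neg heq]
        have hbeq : (digits[j] == digits[i]) = false := by simp [heq]
        simp [List.takeWhile_cons, hbeq]
    · have : digits.drop j = [] := List.drop_eq_nil_of_le (by omega)
      unfold pvRunTo
      rw [dif_neg h, this]
      rfl

lemma outer_spec (digits : List Int) :
    ∀ n i, digits.length - i ≤ n → pvOuter digits i = pvGrp (digits.drop i) := by
  intro n
  induction n with
  | zero =>
    intro i hi
    have hnot : ¬ i < digits.length := by omega
    unfold pvOuter
    rw [dif_neg hnot, List.drop_eq_nil_of_le (by omega)]
    simp [pvGrp]
  | succ n ih =>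
    intro i hi
    by_cases h : i < digits.length
    · have hd : digits.drop i = digits[i] :: digits.drop (i+1) :=
        List.drop_eq_getElem_cons h
      have hj : pvRunTo digits i i =
          i + 1 + ((digits.drop (i+1)).takeWhile (· == digits[i])).length := by
        rw [runTo_spec digits i h (digits.length - i) i le_rfl, hd, List.takeWhile_cons]
        simp only [beq_self_eq_true, if_true, List.length_cons]
        omega
      have hdropj :
          digits.drop (i + 1 + ((digits.drop (i+1)).takeWhile (· == digits[i])).length)
            = (digits.drop (i+1)).dropWhile (· == digits[i]) := by
        rw [dropWhile_eq_drop, List.drop_drop]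
      unfold pvOuter
      rw [dif_pos h, hj, hd]
      simp only [pvGrp]
      by_cases h2 : 1 + ((digits.drop (i+1)).takeWhile (· == digits[i])).length = 2
      · rw [if_pos (by omega), if_pos (by omega)]
      · rw [if_neg (by omega), if_neg (by omega),
            ih (i + 1 + ((digits.drop (i+1)).takeWhile (· == digits[i])).length) (by omega),
            hdropj]
    · have hnil : digits.drop i = [] := List.drop_eq_nil_of_le (by omega)
      unfold pvOuter
      rw [dif_neg h, hnil]
      simp [pvGrp]

lemma B_eq_grp (digits : List Int) : onlyDoubleDigits_alt digits = pvGrp digits := by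
  unfold onlyDoubleDigits_alt
  rw [outer_spec digits digits.length 0 (by omega), List.drop_zero]

-- ===== VERDICT (by name: the statement is the Claim_ definition above) =====
theorem onlyDoubleDigits_spec : Claim_equal_onlyDoubleDigits := by
  intro digits _
  unfold Spec_onlyDoubleDigits
  rw [A_eq_grp, B_eq_grp]
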